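-- pv_equiv track=rewrite | github.com/gematik/fhir-igs-workflow | scripts/requirement-qa/error_code_consistency/parsing.py | resolve_ruleset_codes
-- ===== SOURCE A (Python) =====
-- from typing import Dict, Iterable, List, Optional, Set
--
-- def resolve_ruleset_codes(
--     ruleset: str,
--     refs: Dict[str, List[str]],
--     base_error_codes: Dict[str, Set[str]],
--     seen: Optional[Set[str]] = None,
-- ) -> Set[str]:
--     """Recursively resolve all error codes reachable from a given RuleSet."""
--     if seen is None:
--         seen = set()
--     if ruleset in seen:
--         return set()
--     seen.add(ruleset)
--
--     out: Set[str] = set(base_error_codes.get(ruleset, set()))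
--     for ref in refs.get(ruleset, []):
--         out.update(base_error_codes.get(ref, set()))
--         if ref in refs:
--             out.update(resolve_ruleset_codes(ref, refs, base_error_codes, seen))
--     return out
-- ===== SOURCE B (Python) =====
-- def resolve_ruleset_codes(ruleset, refs, base_error_codes, seen=None):
--     """Iteratively resolve all error codes reachable from a given RuleSet
--     using an explicit stack of pending reference lists (DFS)."""
--     if seen is None:
--         seen = set()
--     if ruleset in seen:
--         return set()
--     seen.add(ruleset)
--     out = set(base_error_codes.get(ruleset, set()))
--     stack = [list(refs.get(ruleset, []))]
--     while stack:
--         top = stack[-1]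
--         if not top:
--             stack.pop()
--             continue
--         ref = top.pop(0)
--         out.update(base_error_codes.get(ref, set()))
--         if ref in refs and ref not in seen:
--             seen.add(ref)
--             stack.append(list(refs.get(ref, [])))
--     return out
-- ===== Notes on version B (the rewrite author's own statement) =====
-- stated objective: alternative
-- what changed: The recursive DFS (each call builds its own result set and the caller merges it) is replaced by an iterative DFS driven by an explicit stack of pending reference lists that threads a single accumulator set, with no recursion and no intermediate per-node sets.
import Mathlib
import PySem

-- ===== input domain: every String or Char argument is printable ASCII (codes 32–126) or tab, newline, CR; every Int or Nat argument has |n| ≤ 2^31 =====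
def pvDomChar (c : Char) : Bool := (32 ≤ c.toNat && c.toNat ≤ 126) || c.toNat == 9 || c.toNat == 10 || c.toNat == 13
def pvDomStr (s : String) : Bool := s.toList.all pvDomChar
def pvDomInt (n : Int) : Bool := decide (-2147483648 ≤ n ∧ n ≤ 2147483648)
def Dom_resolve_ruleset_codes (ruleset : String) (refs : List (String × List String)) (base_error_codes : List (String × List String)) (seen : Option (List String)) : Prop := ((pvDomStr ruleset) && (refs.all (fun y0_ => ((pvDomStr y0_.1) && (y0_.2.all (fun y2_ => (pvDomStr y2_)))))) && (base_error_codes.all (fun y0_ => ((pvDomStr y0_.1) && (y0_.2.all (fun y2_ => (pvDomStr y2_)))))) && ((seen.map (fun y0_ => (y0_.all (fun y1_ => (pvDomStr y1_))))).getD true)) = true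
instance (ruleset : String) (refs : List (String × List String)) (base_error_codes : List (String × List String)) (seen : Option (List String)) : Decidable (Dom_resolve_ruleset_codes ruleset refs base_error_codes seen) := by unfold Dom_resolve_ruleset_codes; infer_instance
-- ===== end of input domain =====

-- B re-implements the recursive DFS as an iterative DFS over an explicit stack of pending
-- reference lists (objective: alternative decomposition, same cost). Equivalence is about the
-- RETURN value; both Pythons also mutate a caller-supplied `seen` in place, adding the same nodes.

-- ===== PORT A =====
-- A's recursion carries Python's shared mutable `seen` by returning it: each call returns
-- (out, seen).  goA is the function body, procA its `for ref in refs.get(ruleset, [])` loop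
-- (structural recursion over the edge list).  The fuel bounds the recursion depth; it only
-- decreases when A recurses, and refs.length + 1 always suffices (proved below).
mutual
def goA (refs base : List (String × List String)) (f : Nat) (ruleset : String) (seen : List String) : List String × List String :=
  match f with
  | 0 => ([], seen)
  | g + 1 =>
    if PySem.Set.contains seen ruleset then ([], seen)
    else procA refs base g (PySem.Dict.getD ⟨refs⟩ ruleset [])
      (PySem.Set.ofList (PySem.Dict.getD ⟨base⟩ ruleset [])) (PySem.Set.add seen ruleset)
termination_by (f, 0)

def procA (refs base : List (String × List String)) (f : Nat) (es : List String) (out seen : List String) : List String × List String :=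
  match es with
  | [] => (out, seen)
  | ref :: es' =>
    let out1 := PySem.Set.update out (PySem.Dict.getD ⟨base⟩ ref [])
    if PySem.Dict.contains (⟨refs⟩ : PySem.Dict String (List String)) ref then
      let r := goA refs base f ref seen
      procA refs base f es' (PySem.Set.update out1 r.1) r.2
    else procA refs base f es' out1 seen
termination_by (f, es.length + 1)
end

def resolve_ruleset_codes (ruleset : String) (refs : List (String × List String)) (base_error_codes : List (String × List String)) (seen : Option (List String)) : List String :=
  (goA refs base_error_codes (refs.length + 1) ruleset (seen.getD [])).1

-- ===== PORT B =====
-- Source B's while-loop: the stack holds the pending reference lists; the loop pops an empty top,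
-- otherwise takes the first pending ref.  Fuel decreases only on the `stack.append` step
-- (each such step sees a fresh refs-key), so refs.length + 1 always suffices (proved below).
def goB (refs base : List (String × List String)) (f : Nat) (out seen : List String) (stack : List (List String)) : List String × List String :=
  match stack with
  | [] => (out, seen)
  | [] :: rest => goB refs base f out seen rest
  | (ref :: pending) :: rest =>
    let out1 := PySem.Set.update out (PySem.Dict.getD ⟨base⟩ ref [])
    if PySem.Dict.contains (⟨refs⟩ : PySem.Dict String (List String)) ref && !(PySem.Set.contains seen ref) then
      match f with
      | 0 => (out1, seen)
      | g + 1 => goB refs base g out1 (PySem.Set.add seen ref) (PySem.Dict.getD ⟨refs⟩ ref [] :: pending :: rest)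
    else goB refs base f out1 seen (pending :: rest)
termination_by (f, (stack.map (fun l => l.length + 1)).sum)

def resolve_ruleset_codes_alt (ruleset : String) (refs : List (String × List String)) (base_error_codes : List (String × List String)) (seen : Option (List String)) : List String :=
  let s0 := seen.getD []
  if PySem.Set.contains s0 ruleset then []
  else
    (goB refs base_error_codes (refs.length + 1)
      (PySem.Set.ofList (PySem.Dict.getD ⟨base_error_codes⟩ ruleset []))
      (PySem.Set.add s0 ruleset)
      [PySem.Dict.getD ⟨refs⟩ ruleset []]).1

-- ===== PRECONDITION & SPEC =====
def Spec_resolve_ruleset_codes (ruleset : String) (refs : List (String × List String)) (base_error_codes : List (String × List String)) (seen : Option (List String)) (out : List String) : Prop := out = resolve_ruleset_codes_alt ruleset refs base_error_codes seen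
instance (ruleset : String) (refs : List (String × List String)) (base_error_codes : List (String × List String)) (seen : Option (List String)) (out : List String) : Decidable (Spec_resolve_ruleset_codes ruleset refs base_error_codes seen out) := by unfold Spec_resolve_ruleset_codes; infer_instance

-- ===== CLAIM (what is proved, stated in full; the proofs are below) =====
def Claim_equal_resolve_ruleset_codes : Prop := ∀ (ruleset : String) (refs : List (String × List String)) (base_error_codes : List (String × List String)) (seen : Option (List String)), Dom_resolve_ruleset_codes ruleset refs base_error_codes seen → Spec_resolve_ruleset_codes ruleset refs base_error_codes seen (resolve_ruleset_codes ruleset refs base_error_codes seen)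

-- ===== LEMMAS AND PROOFS =====

-- `Set.update` is an action of list concatenation on sets
lemma upd_add (X s : List String) (x : String) :
    PySem.Set.update X (PySem.Set.add s x) = PySem.Set.add (PySem.Set.update X s) x := by
  by_cases h : x ∈ s
  · rw [PySem.Set.add_of_mem h, PySem.Set.add_of_mem ((PySem.Set.mem_update X s x).mpr (Or.inr h))]
  · rw [PySem.Set.add_of_not_mem h, PySem.Set.update_append, PySem.Set.update_cons, PySem.Set.update_nil]

lemma upd_assoc (X s b : List String) :
    PySem.Set.update X (PySem.Set.update s b) = PySem.Set.update (PySem.Set.update X s) b := by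
  induction b generalizing s with
  | nil => rw [PySem.Set.update_nil, PySem.Set.update_nil]
  | cons x b ih => rw [PySem.Set.update_cons, ih, upd_add, ← PySem.Set.update_cons]

lemma upd_absorb (s t : List String) (h : ∀ x ∈ t, x ∈ s) : PySem.Set.update s t = s := by
  induction t with
  | nil => exact PySem.Set.update_nil s
  | cons x t ih =>
    rw [PySem.Set.update_cons, PySem.Set.add_of_mem (h x (List.mem_cons_self))]
    exact ih (fun y hy => h y (List.mem_cons_of_mem _ hy))

lemma upd_ofList (s t : List String) :
    PySem.Set.update s (PySem.Set.ofList t) = PySem.Set.update s t := by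
  rw [← PySem.Set.update_empty, upd_assoc]
  congr 1

-- counting helpers for the fuel bound
lemma filt_mono {α : Type} (l : List α) (p q : α → Bool) (h : ∀ a, p a = true → q a = true) :
    (l.filter p).length ≤ (l.filter q).length := by
  induction l with
  | nil => simp
  | cons a l ih =>
    by_cases hp : p a = true
    · simp [hp, h a hp]; omega
    · rw [List.filter_cons, if_neg (by simp [hp]), List.filter_cons]
      cases hq : q a
      · rw [if_neg (by simp)]; exact ih
      · rw [if_pos rfl]; exact le_trans ih (by simp)

lemma filt_strict {α : Type} (l : List α) (p q : α → Bool) (a : α) (ha : a ∈ l)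
    (hpa : p a = true) (hqa : q a = false) (h : ∀ x, q x = true → p x = true) :
    (l.filter q).length < (l.filter p).length := by
  induction l with
  | nil => cases ha
  | cons b l ih =>
    rcases List.mem_cons.mp ha with rfl | hb
    · rw [List.filter_cons, List.filter_cons, if_pos hpa, if_neg (by simp [hqa])]
      simpa using Nat.lt_succ_of_le (filt_mono l q p h)
    · rw [List.filter_cons, List.filter_cons]
      cases hq : q b
      · rw [if_neg (by simp)]
        split
        · simpa using Nat.lt_succ_of_lt (ih hb)
        · exact ih hb
      · rw [if_pos rfl, if_pos (h b hq)]
        simpa using ih hb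

-- number of refs-keys not yet seen: the quantity both fuels bound
def nleft (refs : List (String × List String)) (seen : List String) : Nat :=
  ((refs.map Prod.fst).filter (fun k => !(PySem.Set.contains seen k))).length

lemma nleft_le (refs : List (String × List String)) (seen : List String) :
    nleft refs seen ≤ refs.length :=
  le_trans (List.length_filter_le _ _) (by simp)

lemma nleft_mono (refs : List (String × List String)) {seen seen' : List String}
    (h : seen ⊆ seen') : nleft refs seen' ≤ nleft refs seen := by
  apply filt_mono
  intro a ha
  have ha' : a ∉ seen' := by simpa using ha
  simpa using fun hm => ha' (h hm)

lemma nleft_add_lt (refs : List (String × List String)) {seen : List String} {r : String}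
    (hk : PySem.Dict.contains (⟨refs⟩ : PySem.Dict String (List String)) r = true)
    (hs : PySem.Set.contains seen r = false) :
    nleft refs (PySem.Set.add seen r) < nleft refs seen := by
  apply filt_strict _ _ _ r
  · simpa [PySem.Dict.keys_mk] using (PySem.Dict.contains_iff_mem_keys _ _).mp hk
  · simpa using hs
  · simp [PySem.Set.mem_add]
  · intro x hx
    have hx' : x ∉ PySem.Set.add seen r := by simpa using hx
    simpa using fun hm => hx' ((PySem.Set.mem_add seen r x).mpr (Or.inl hm))

-- the seen-set only grows
lemma seen_sub (refs base : List (String × List String)) (f : Nat) :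
    (∀ r seen, seen ⊆ (goA refs base f r seen).2) ∧
    (∀ es out seen, seen ⊆ (procA refs base f es out seen).2) := by
  induction f with
  | zero =>
    have hA : ∀ (r : String) (seen : List String), seen ⊆ (goA refs base 0 r seen).2 := by
      intro r seen; rw [goA.eq_def]; exact fun _ h => h
    refine ⟨hA, ?_⟩
    intro es
    induction es with
    | nil => intro out seen; rw [procA.eq_def]; exact fun _ h => h
    | cons ref es ih =>
      intro out seen
      rw [procA.eq_def]
      simp only []
      split
      · exact fun x hx => ih _ _ ((hA ref seen) hx)
      · exact ih _ _
  | succ g ih =>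
    have hA : ∀ (r : String) (seen : List String), seen ⊆ (goA refs base (g+1) r seen).2 := by
      intro r seen
      rw [goA.eq_def]
      simp only []
      split
      · exact fun _ h => h
      · exact fun x hx => (ih.2 _ _ _) ((PySem.Set.mem_add seen r x).mpr (Or.inl hx))
    refine ⟨hA, ?_⟩
    intro es
    induction es with
    | nil => intro out seen; rw [procA.eq_def]; exact fun _ h => h
    | cons ref es ihe =>
      intro out seen
      rw [procA.eq_def]
      simp only []
      split
      · exact fun x hx => ihe _ _ ((hA ref seen) hx)
      · exact ihe _ _

-- fuel stability for A's side: any fuel above nleft gives the same run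
lemma stab1 (refs base : List (String × List String)) (f : Nat) :
    (∀ r seen, nleft refs seen < f → goA refs base f r seen = goA refs base (f + 1) r seen) ∧
    (∀ es out seen, nleft refs seen < f → procA refs base f es out seen = procA refs base (f + 1) es out seen) := by
  induction f with
  | zero => exact ⟨fun _ _ h => absurd h (by omega), fun _ _ _ h => absurd h (by omega)⟩
  | succ g ih =>
    have hA : ∀ (r : String) (seen : List String), nleft refs seen < g + 1 →
        goA refs base (g + 1) r seen = goA refs base (g + 2) r seen := by
      intro r seen hn
      rw [goA.eq_def, goA.eq_def]
      simp only []
      split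
      · rfl
      · rename_i hc
        cases hk : PySem.Dict.contains (⟨refs⟩ : PySem.Dict String (List String)) r
        · rw [PySem.Dict.getD_of_not_contains _ _ hk]
          rw [procA.eq_def, procA.eq_def]
        · exact ih.2 _ _ _ (lt_of_lt_of_le (nleft_add_lt refs hk (Bool.eq_false_iff.mpr hc)) (by omega))
    refine ⟨hA, ?_⟩
    intro es
    induction es with
    | nil => intro out seen _; rw [procA.eq_def, procA.eq_def]
    | cons ref es ihe =>
      intro out seen hn
      rw [procA.eq_def, procA.eq_def]
      simp only []
      split
      · rw [← hA ref seen hn]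
        have hsub : seen ⊆ (goA refs base (g+1) ref seen).2 := (seen_sub refs base (g+1)).1 ref seen
        exact ihe _ _ (lt_of_le_of_lt (nleft_mono refs hsub) hn)
      · exact ihe _ _ hn

lemma stabP (refs base : List (String × List String)) (f f' : Nat) (es out seen : List String)
    (hf : nleft refs seen < f) (hf' : nleft refs seen < f') :
    procA refs base f es out seen = procA refs base f' es out seen := by
  have chain : ∀ k f₀, nleft refs seen < f₀ →
      procA refs base f₀ es out seen = procA refs base (f₀ + k) es out seen := by
    intro k
    induction k with
    | zero => intro f₀ _; rfl
    | succ k ih =>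
      intro f₀ h₀
      rw [ih f₀ h₀, (stab1 refs base (f₀ + k)).2 es out seen (by omega)]
      rfl
  rcases le_total f f' with h | h
  · obtain ⟨k, rfl⟩ := Nat.exists_eq_add_of_le h
    exact chain k f hf
  · obtain ⟨k, rfl⟩ := Nat.exists_eq_add_of_le h
    exact (chain k f' hf').symm

-- fuel stability for B's side
lemma stabB1 (refs base : List (String × List String)) (f : Nat) (out seen : List String)
    (stack : List (List String)) (hf : nleft refs seen < f) :
    goB refs base f out seen stack = goB refs base (f + 1) out seen stack := by
  fun_induction goB refs base f out seen stack with
  | case1 f out seen => rw [goB.eq_def]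
  | case2 f out seen rest ih =>
    rw [goB.eq_def (f := f + 1)]
    exact ih hf
  | case3 out seen ref pending rest out1 h => exact absurd hf (by omega)
  | case4 out seen ref pending rest out1 h g ih =>
    have hr : PySem.Dict.contains (⟨refs⟩ : PySem.Dict String (List String)) ref = true := by
      cases hc : PySem.Dict.contains (⟨refs⟩ : PySem.Dict String (List String)) ref
      · rw [hc] at h; simp at h
      · rfl
    have hs : PySem.Set.contains seen ref = false := by
      cases hc : PySem.Set.contains seen ref
      · rfl
      · rw [hc] at h; simp at h
    rw [goB.eq_def (f := g.succ + 1)]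
    simp only [h, if_pos]
    exact ih (by
      have := nleft_add_lt refs hr hs
      omega)
  | case5 f out seen ref pending rest out1 h ih =>
    rw [goB.eq_def (f := f + 1)]
    simp only []
    rw [if_neg h]
    exact ih hf

lemma stabB (refs base : List (String × List String)) (f f' : Nat) (out seen : List String)
    (stack : List (List String)) (hf : nleft refs seen < f) (hf' : nleft refs seen < f') :
    goB refs base f out seen stack = goB refs base f' out seen stack := by
  have chain : ∀ k f₀, nleft refs seen < f₀ →
      goB refs base f₀ out seen stack = goB refs base (f₀ + k) out seen stack := by
    intro k
    induction k with
    | zero => intro f₀ _; rfl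
    | succ k ih =>
      intro f₀ h₀
      rw [ih f₀ h₀, stabB1 refs base (f₀ + k) out seen stack (by omega)]
      rfl
  rcases le_total f f' with h | h
  · obtain ⟨k, rfl⟩ := Nat.exists_eq_add_of_le h
    exact chain k f hf
  · obtain ⟨k, rfl⟩ := Nat.exists_eq_add_of_le h
    exact (chain k f' hf').symm

-- A's edge loop threads its accumulator: running it from `update X s` is running it from `s`
-- and merging the result into X afterwards (the shape of A's `out.update(resolve(...))`)
lemma procA_update (refs base : List (String × List String)) (f : Nat) (es : List String)
    (X s seen : List String) :
    procA refs base f es (PySem.Set.update X s) seen =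
      (PySem.Set.update X (procA refs base f es s seen).1, (procA refs base f es s seen).2) := by
  induction es generalizing s seen with
  | nil => rw [procA.eq_def, procA.eq_def]
  | cons ref es ih =>
    rw [procA.eq_def (es := ref :: es), procA.eq_def (es := ref :: es)]
    simp only []
    split
    · rw [← upd_assoc, ← upd_assoc, ih, upd_assoc]
    · rw [← upd_assoc, ih]

lemma main_lemma (refs base : List (String × List String)) :
    ∀ n pending seen, nleft refs seen < n → ∀ fA fB out rest,
      nleft refs seen < fA → nleft refs seen < fB →
      goB refs base fB out seen (pending :: rest) =
        goB refs base fB (procA refs base fA pending out seen).1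
          (procA refs base fA pending out seen).2 rest := by
  intro n
  induction n with
  | zero => intro pending seen h; exact absurd h (by omega)
  | succ n ihn =>
    intro pending
    induction pending with
    | nil =>
      intro seen _ fA fB out rest _ _
      rw [procA.eq_def, goB.eq_def (stack := [] :: rest)]
    | cons ref es ihe =>
      intro seen hn fA fB out rest hfA hfB
      obtain ⟨a, rfl⟩ : ∃ a, fA = a + 1 := ⟨fA - 1, by omega⟩
      obtain ⟨b, rfl⟩ : ∃ b, fB = b + 1 := ⟨fB - 1, by omega⟩
      rw [goB.eq_def (stack := (ref :: es) :: rest), procA.eq_def (es := ref :: es)]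
      simp only []
      cases hR : PySem.Dict.contains (⟨refs⟩ : PySem.Dict String (List String)) ref
      · rw [if_neg (by simp [hR]), if_neg (by simp [hR])]
        exact ihe seen hn (a + 1) (b + 1) _ rest hfA hfB
      · cases hs : PySem.Set.contains seen ref
        · -- unseen: B expands, A recurses
          rw [if_pos (by simp [hR, hs]), if_pos rfl]
          have hlt : nleft refs (PySem.Set.add seen ref) < nleft refs seen :=
            nleft_add_lt refs hR hs
          rw [goA.eq_def (f := a + 1)]
          simp only [hs, Bool.false_eq_true, if_false]
          have step1 := ihn (PySem.Dict.getD ⟨refs⟩ ref []) (PySem.Set.add seen ref)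
            (by omega) (a + 1) b
            (PySem.Set.update out (PySem.Dict.getD ⟨base⟩ ref []))
            (es :: rest) (by omega) (by omega)
          rw [step1]
            -- name the two runs of A's loop on ref's edges
          have habs : PySem.Set.update (PySem.Set.update out (PySem.Dict.getD ⟨base⟩ ref []))
              (PySem.Set.ofList (PySem.Dict.getD ⟨base⟩ ref [])) =
              PySem.Set.update out (PySem.Dict.getD ⟨base⟩ ref []) := by
            rw [upd_ofList]
            exact upd_absorb _ _ (fun x hx => (PySem.Set.mem_update _ _ x).mpr (Or.inr hx))
          have hQ : procA refs base (a + 1) (PySem.Dict.getD ⟨refs⟩ ref [])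
              (PySem.Set.update out (PySem.Dict.getD ⟨base⟩ ref [])) (PySem.Set.add seen ref) =
              (PySem.Set.update (PySem.Set.update out (PySem.Dict.getD ⟨base⟩ ref []))
                (procA refs base (a + 1) (PySem.Dict.getD ⟨refs⟩ ref [])
                  (PySem.Set.ofList (PySem.Dict.getD ⟨base⟩ ref [])) (PySem.Set.add seen ref)).1,
               (procA refs base (a + 1) (PySem.Dict.getD ⟨refs⟩ ref [])
                  (PySem.Set.ofList (PySem.Dict.getD ⟨base⟩ ref [])) (PySem.Set.add seen ref)).2) := by
            conv_lhs => rw [← habs]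
            exact procA_update refs base (a + 1) _ _ _ _
          have hRR : procA refs base (a + 1) (PySem.Dict.getD ⟨refs⟩ ref [])
              (PySem.Set.ofList (PySem.Dict.getD ⟨base⟩ ref [])) (PySem.Set.add seen ref) =
              procA refs base a (PySem.Dict.getD ⟨refs⟩ ref [])
              (PySem.Set.ofList (PySem.Dict.getD ⟨base⟩ ref [])) (PySem.Set.add seen ref) :=
            stabP refs base (a + 1) a _ _ _ (by omega) (by omega)
          have e1 : (procA refs base (a + 1) (PySem.Dict.getD ⟨refs⟩ ref [])
              (PySem.Set.update out (PySem.Dict.getD ⟨base⟩ ref [])) (PySem.Set.add seen ref)).1 =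
              PySem.Set.update (PySem.Set.update out (PySem.Dict.getD ⟨base⟩ ref []))
                (procA refs base a (PySem.Dict.getD ⟨refs⟩ ref [])
                  (PySem.Set.ofList (PySem.Dict.getD ⟨base⟩ ref [])) (PySem.Set.add seen ref)).1 := by
            rw [hQ, hRR]
          have e2 : (procA refs base (a + 1) (PySem.Dict.getD ⟨refs⟩ ref [])
              (PySem.Set.update out (PySem.Dict.getD ⟨base⟩ ref [])) (PySem.Set.add seen ref)).2 =
              (procA refs base a (PySem.Dict.getD ⟨refs⟩ ref [])
                  (PySem.Set.ofList (PySem.Dict.getD ⟨base⟩ ref [])) (PySem.Set.add seen ref)).2 := by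
            rw [hQ, hRR]
          rw [e1, e2]
          have hsub : PySem.Set.add seen ref ⊆ (procA refs base a (PySem.Dict.getD ⟨refs⟩ ref [])
              (PySem.Set.ofList (PySem.Dict.getD ⟨base⟩ ref [])) (PySem.Set.add seen ref)).2 :=
            (seen_sub refs base a).2 _ _ _
          have hnn : nleft refs ((procA refs base a (PySem.Dict.getD ⟨refs⟩ ref [])
              (PySem.Set.ofList (PySem.Dict.getD ⟨base⟩ ref [])) (PySem.Set.add seen ref)).2) ≤
              nleft refs (PySem.Set.add seen ref) := nleft_mono refs hsub
          rw [stabB refs base b (b + 1) _ _ _ (by omega) (by omega)]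
          exact ihn es _ (by omega) (a + 1) (b + 1) _ rest (by omega) (by omega)
        · -- ref already seen: A's recursive call returns ([], seen)
          rw [if_neg (by simp [hs]), if_pos rfl]
          rw [goA.eq_def (f := a + 1)]
          simp only [hs, if_pos]
          rw [PySem.Set.update_nil]
          exact ihe seen hn (a + 1) (b + 1) _ rest hfA hfB

-- ===== VERDICT (by name: the statement is the Claim_ definition above) =====
theorem resolve_ruleset_codes_spec : Claim_equal_resolve_ruleset_codes := by
  intro ruleset refs base seen _
  unfold Spec_resolve_ruleset_codes
  unfold resolve_ruleset_codes resolve_ruleset_codes_alt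
  rw [goA.eq_def (f := refs.length + 1)]
  simp only []
  cases hc : PySem.Set.contains (seen.getD []) ruleset
  · rw [if_neg (by simp [hc]), if_neg (by simp [hc])]
    have hle : nleft refs (PySem.Set.add (seen.getD []) ruleset) ≤ refs.length :=
      nleft_le refs _
    have hmain := main_lemma refs base (nleft refs (PySem.Set.add (seen.getD []) ruleset) + 1)
      (PySem.Dict.getD ⟨refs⟩ ruleset []) (PySem.Set.add (seen.getD []) ruleset)
      (by omega) (refs.length + 1) (refs.length + 1)
      (PySem.Set.ofList (PySem.Dict.getD ⟨base⟩ ruleset [])) []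
      (by omega) (by omega)
    rw [hmain, goB.eq_def (stack := [])]
    cases hk : PySem.Dict.contains (⟨refs⟩ : PySem.Dict String (List String)) ruleset
    · rw [PySem.Dict.getD_of_not_contains _ _ hk]
      rw [procA.eq_def (es := []), procA.eq_def (es := [])]
    · have hlt : nleft refs (PySem.Set.add (seen.getD []) ruleset) < nleft refs (seen.getD []) :=
        nleft_add_lt refs hk hc
      have hle0 : nleft refs (seen.getD []) ≤ refs.length := nleft_le refs _
      rw [stabP refs base refs.length (refs.length + 1) _ _ _ (by omega) (by omega)]
  · rw [if_pos rfl, if_pos (by simp [hc])]
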